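-- pv_equiv track=rewrite | github.com/MrBrantCode/unitest_baseline | mut_generate/mist_train_taco/taco_4703/solution.py | chessboard_game
-- ===== SOURCE A (Python) =====
-- def chessboard_game(x, y):
--     # Possible moves
--     moves = [(-2, 1), (-2, -1), (1, -2), (-1, -2)]
--
--     # Initialize sets for winning positions
--     First = set()
--     Second = set()
--
--     # Create a set of all possible positions on the 15x15 grid
--     grid_copy = {(i, j) for i in range(1, 16) for j in range(1, 16)}
--
--     # Determine winning positions
--     t = 0
--     while len(First) + len(Second) != 225:
--         if t % 2 == 0:
--             for (i, j) in grid_copy: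
--                 n = 0
--                 for (dx, dy) in moves:
--                     if (i + dx, j + dy) not in grid_copy or (i + dx, j + dy) in First:
--                         n += 1
--                 if n == 4:
--                     Second.add((i, j))
--         else:
--             for (i, j) in grid_copy:
--                 for (dx, dy) in moves:
--                     if (i + dx, j + dy) in Second:
--                         First.add((i, j))
--         t += 1
--
--     # Determine the winner based on the initial position
--     if (x, y) in First:
--         return "First"
--     else:
--         return "Second"
-- ===== SOURCE B (Python) =====
-- def chessboard_game(x, y):
--     # Closed form: on the 15x15 board a cell is losing for the mover exactly
--     # when x%4 and y%4 are both in {1,2}; everything else (and any off-board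
--     # query, which A classifies as not-First) is "Second" only in that case.
--     if 1 <= x <= 15 and 1 <= y <= 15 and not (x % 4 in (1, 2) and y % 4 in (1, 2)):
--         return "First"
--     return "Second"
-- ===== Notes on version B (the rewrite author's own statement) =====
-- stated objective: faster
-- what changed: Replaces the per-call iterative fixed-point computation over all 225 board cells with a closed-form modulo-4 test (losing cells are exactly those with x%4 and y%4 both in {1,2}).
import Mathlib
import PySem

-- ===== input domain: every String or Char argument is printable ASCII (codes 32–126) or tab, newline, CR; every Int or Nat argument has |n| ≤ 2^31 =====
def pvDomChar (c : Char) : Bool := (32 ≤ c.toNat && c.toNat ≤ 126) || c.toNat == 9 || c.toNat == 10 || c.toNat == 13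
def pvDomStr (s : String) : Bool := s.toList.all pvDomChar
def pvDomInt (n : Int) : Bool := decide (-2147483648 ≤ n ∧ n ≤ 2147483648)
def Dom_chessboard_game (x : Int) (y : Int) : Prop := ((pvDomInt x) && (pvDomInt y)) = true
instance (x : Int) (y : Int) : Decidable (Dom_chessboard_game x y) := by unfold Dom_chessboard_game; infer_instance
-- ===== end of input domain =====

-- B replaces A's per-call iterative fixed-point computation over the 225 board cells with a
-- closed-form modulo-4 test (objective: faster by a constant factor; same value everywhere).

-- ===== PORT A =====
-- A-side helpers: the move list, the grid comprehension (as a list, then as the Python set),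
-- the two passes of A's while-loop body, and the while loop itself as a fuel-bounded
-- recursion (the Python loop reaches its fixed point after 14 iterations, so fuel 64 is
-- never exhausted and the recursion stops exactly where Python's `while` stops).  The sets
-- do not depend on the inputs x, y, so they are lifted to top-level helper definitions;
-- chessboard_game itself performs A's final membership test.
def pvGridList : List (Int × Int) :=
  (PySem.List.pyRange 1 16 1).flatMap (fun i => (PySem.List.pyRange 1 16 1).map (fun j => (i, j)))

def pvGridA : PySem.Set (Int × Int) := PySem.Set.ofList pvGridList

def pvMoves : List (Int × Int) := [(-2, 1), (-2, -1), (1, -2), (-1, -2)]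

def pvEvenPass (First Second : PySem.Set (Int × Int)) : PySem.Set (Int × Int) :=
  pvGridA.foldl (fun Sec p =>
    let n : Int := pvMoves.foldl (fun n m =>
      if ¬ ((p.1 + m.1, p.2 + m.2) ∈ pvGridA) ∨ (p.1 + m.1, p.2 + m.2) ∈ First then n + 1 else n) 0
    if n = 4 then PySem.Set.add Sec p else Sec) Second

def pvOddPass (First Second : PySem.Set (Int × Int)) : PySem.Set (Int × Int) :=
  pvGridA.foldl (fun Fst p =>
    pvMoves.foldl (fun Fst m =>
      if (p.1 + m.1, p.2 + m.2) ∈ Second then PySem.Set.add Fst p else Fst) Fst) First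

def pvLoopA : Nat → PySem.Set (Int × Int) → PySem.Set (Int × Int) → Nat → PySem.Set (Int × Int)
  | 0, First, _, _ => First
  | fuel + 1, First, Second, t =>
    if PySem.Set.len First + PySem.Set.len Second ≠ 225 then
      if t % 2 = 0 then pvLoopA fuel First (pvEvenPass First Second) (t + 1)
      else pvLoopA fuel (pvOddPass First Second) Second (t + 1)
    else First

def pvFirstA : PySem.Set (Int × Int) := pvLoopA 64 PySem.Set.empty PySem.Set.empty 0

def chessboard_game (x : Int) (y : Int) : String :=
  if (x, y) ∈ pvFirstA then "First" else "Second"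

-- ===== PORT B =====
def chessboard_game_alt (x : Int) (y : Int) : String :=
  if 1 ≤ x ∧ x ≤ 15 ∧ 1 ≤ y ∧ y ≤ 15 ∧
      ¬ ((PySem.Int.mod x 4 = 1 ∨ PySem.Int.mod x 4 = 2) ∧
         (PySem.Int.mod y 4 = 1 ∨ PySem.Int.mod y 4 = 2)) then "First"
  else "Second"

-- ===== PRECONDITION & SPEC =====
def Spec_chessboard_game (x : Int) (y : Int) (out : String) : Prop := out = chessboard_game_alt x y
instance (x : Int) (y : Int) (out : String) : Decidable (Spec_chessboard_game x y out) := by unfold Spec_chessboard_game; infer_instance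

-- ===== CLAIM (what is proved, stated in full; the proofs are below) =====
def Claim_equal_chessboard_game : Prop := ∀ (x : Int) (y : Int), Dom_chessboard_game x y → Spec_chessboard_game x y (chessboard_game x y)

-- ===== LEMMAS AND PROOFS =====

-- Arithmetic descriptions of the intermediate stages of A's fixed-point loop.
def inGb (q : Int × Int) : Bool := decide (1 ≤ q.1 ∧ q.1 ≤ 15 ∧ 1 ≤ q.2 ∧ q.2 ≤ 15)
def loseb (q : Int × Int) : Bool :=
  decide ((q.1 % 4 = 1 ∨ q.1 % 4 = 2) ∧ (q.2 % 4 = 1 ∨ q.2 % 4 = 2))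
def bandv (q : Int × Int) : Int := (q.1 - 1) / 4 + (q.2 - 1) / 4
-- losing cells known after even pass #k (iteration t = 2k)
def specSb (k : Nat) (q : Int × Int) : Bool := inGb q && loseb q && decide (bandv q ≤ k)
-- winning cells known after odd pass #k (iteration t = 2k+1)
def specFb (k : Nat) (q : Int × Int) : Bool :=
  inGb q && pvMoves.any (fun m =>
    inGb (q.1 + m.1, q.2 + m.2) && loseb (q.1 + m.1, q.2 + m.2) &&
    decide (bandv (q.1 + m.1, q.2 + m.2) ≤ k))
def specS0 : Nat → Int × Int → Bool
  | 0, _ => false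
  | k + 1, q => specSb k q
def specF0 : Nat → Int × Int → Bool
  | 0, _ => false
  | k + 1, q => specFb k q
def countTF : Nat → Nat
  | 0 => 0 | 1 => 11 | 2 => 34 | 3 => 69 | 4 => 110 | 5 => 139 | 6 => 156 | _ => 161
def countTS : Nat → Nat
  | 0 => 0 | 1 => 4 | 2 => 12 | 3 => 24 | 4 => 40 | 5 => 52 | 6 => 60 | _ => 64

theorem mem_pvGridList (q : Int × Int) :
    q ∈ pvGridList ↔ (1 ≤ q.1 ∧ q.1 ≤ 15 ∧ 1 ≤ q.2 ∧ q.2 ≤ 15) := by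
  obtain ⟨a, b⟩ := q
  simp only [pvGridList, List.mem_flatMap, List.mem_map, PySem.List.mem_pyRange_one,
    Prod.mk.injEq]
  constructor
  · rintro ⟨i, ⟨hi1, hi2⟩, j, ⟨hj1, hj2⟩, rfl, rfl⟩
    exact ⟨hi1, by omega, hj1, by omega⟩
  · rintro ⟨h1, h2, h3, h4⟩
    exact ⟨a, ⟨h1, by omega⟩, b, ⟨h3, by omega⟩, rfl, rfl⟩

set_option maxRecDepth 40000 in
theorem nodup_pvGridList : pvGridList.Nodup := by decide

theorem mem_pvGridA (q : Int × Int) : q ∈ pvGridA ↔ inGb q = true := by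
  rw [pvGridA, PySem.Set.mem_ofList, mem_pvGridList, inGb]
  simp

theorem mem_foldl_step {α : Type} (g : List α → α → List α) (E : α → Prop)
    (hg : ∀ acc x q, q ∈ g acc x ↔ q ∈ acc ∨ (q = x ∧ E x)) :
    ∀ (l S : List α) (q : α), q ∈ l.foldl g S ↔ q ∈ S ∨ (q ∈ l ∧ E q) := by
  intro l
  induction l with
  | nil => simp
  | cons a l ih =>
    intro S q
    rw [List.foldl_cons, ih, hg]
    simp only [List.mem_cons]
    constructor
    · rintro ((h | ⟨rfl, h⟩) | ⟨h1, h2⟩)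
      · exact Or.inl h
      · exact Or.inr ⟨Or.inl rfl, h⟩
      · exact Or.inr ⟨Or.inr h1, h2⟩
    · rintro (h | ⟨(rfl | h1), h2⟩)
      · exact Or.inl (Or.inl h)
      · exact Or.inl (Or.inr ⟨rfl, h2⟩)
      · exact Or.inr ⟨h1, h2⟩

theorem nodup_foldl_step {α : Type} (g : List α → α → List α)
    (hg : ∀ acc x, acc.Nodup → (g acc x).Nodup) :
    ∀ (l S : List α), S.Nodup → (l.foldl g S).Nodup := by
  intro l
  induction l with
  | nil => intro S h; simpa using h
  | cons a l ih => intro S h; rw [List.foldl_cons]; exact ih _ (hg _ _ h)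

theorem n4_iff (P : Int × Int → Prop) [DecidablePred P] :
    pvMoves.foldl (fun n m => if P m then n + 1 else n) (0 : Int) = 4 ↔ ∀ m ∈ pvMoves, P m := by
  simp only [pvMoves, List.foldl, List.forall_mem_cons, List.not_mem_nil]
  split_ifs <;> simp_all

theorem mem_evenPass (F S : PySem.Set (Int × Int)) (q : Int × Int) :
    q ∈ pvEvenPass F S ↔ q ∈ S ∨ (q ∈ pvGridA ∧ ∀ m ∈ pvMoves,
      ¬ ((q.1 + m.1, q.2 + m.2) ∈ pvGridA) ∨ (q.1 + m.1, q.2 + m.2) ∈ F) := by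
  unfold pvEvenPass
  rw [mem_foldl_step _ (fun p => ∀ m ∈ pvMoves,
        ¬ ((p.1 + m.1, p.2 + m.2) ∈ pvGridA) ∨ (p.1 + m.1, p.2 + m.2) ∈ F)]
  intro acc x q
  simp only
  rw [← n4_iff (fun m => ¬ ((x.1 + m.1, x.2 + m.2) ∈ pvGridA) ∨ (x.1 + m.1, x.2 + m.2) ∈ F)]
  split_ifs with h
  · simp [PySem.Set.mem_add, h]
  · simp [h]

theorem mem_oddInner (S Fst : PySem.Set (Int × Int)) (p q : Int × Int) :
    q ∈ pvMoves.foldl (fun Fst m =>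
        if (p.1 + m.1, p.2 + m.2) ∈ S then PySem.Set.add Fst p else Fst) Fst ↔
      q ∈ Fst ∨ (q = p ∧ ∃ m ∈ pvMoves, (p.1 + m.1, p.2 + m.2) ∈ S) := by
  simp only [pvMoves, List.foldl]
  split_ifs <;> simp [PySem.Set.mem_add] <;> tauto

theorem mem_oddPass (F S : PySem.Set (Int × Int)) (q : Int × Int) :
    q ∈ pvOddPass F S ↔ q ∈ F ∨ (q ∈ pvGridA ∧ ∃ m ∈ pvMoves,
      (q.1 + m.1, q.2 + m.2) ∈ S) := by
  unfold pvOddPass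
  rw [mem_foldl_step _ (fun p => ∃ m ∈ pvMoves, (p.1 + m.1, p.2 + m.2) ∈ S)]
  exact fun acc x q => mem_oddInner S acc x q

theorem nodup_evenPass (F S : PySem.Set (Int × Int)) (h : S.Nodup) : (pvEvenPass F S).Nodup := by
  unfold pvEvenPass
  apply nodup_foldl_step _ _ _ _ h
  intro acc x hn
  simp only
  split_ifs <;> [exact PySem.Set.nodup_add _ _ hn; exact hn]

theorem nodup_oddPass (F S : PySem.Set (Int × Int)) (h : F.Nodup) : (pvOddPass F S).Nodup := by
  unfold pvOddPass
  apply nodup_foldl_step _ _ _ _ h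
  intro acc x hn
  simp only [pvMoves, List.foldl]
  split_ifs <;> repeat (first | assumption | apply PySem.Set.nodup_add _ _)

-- the seven even-pass transitions, checked cell by cell
set_option maxRecDepth 40000 in
theorem TE : ∀ k : Nat, k < 7 → ∀ q ∈ pvGridList,
    ((specS0 k q = true ∨ (inGb q = true ∧ ∀ m ∈ pvMoves,
        ¬ (inGb (q.1 + m.1, q.2 + m.2) = true) ∨ specF0 k (q.1 + m.1, q.2 + m.2) = true)) ↔
      specS0 (k + 1) q = true) := by decide

-- the seven odd-pass transitions, checked cell by cell
set_option maxRecDepth 40000 in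
theorem TO : ∀ k : Nat, k < 7 → ∀ q ∈ pvGridList,
    ((specF0 k q = true ∨ (inGb q = true ∧ ∃ m ∈ pvMoves,
        specS0 (k + 1) (q.1 + m.1, q.2 + m.2) = true)) ↔
      specF0 (k + 1) q = true) := by decide

-- the final First set is exactly the non-losing grid cells
set_option maxRecDepth 40000 in
theorem TW : ∀ q ∈ pvGridList, (specF0 7 q = true ↔ loseb q = false) := by decide

-- sizes of the stage sets
set_option maxRecDepth 40000 in
theorem TC : ∀ k : Nat, k < 8 →
    (pvGridList.filter (fun q => specF0 k q)).length = countTF k ∧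
    (pvGridList.filter (fun q => specS0 k q)).length = countTS k := by decide

theorem specS0_grid : ∀ (k : Nat) (q : Int × Int), specS0 k q = true → inGb q = true := by
  intro k q h
  cases k with
  | zero => simp [specS0] at h
  | succ k => simp [specS0, specSb] at h; exact h.1.1
theorem specF0_grid : ∀ (k : Nat) (q : Int × Int), specF0 k q = true → inGb q = true := by
  intro k q h
  cases k with
  | zero => simp [specF0] at h
  | succ k => simp [specF0, specFb] at h; exact h.1

theorem inGb_mem (q : Int × Int) (h : inGb q = true) : q ∈ pvGridList := by
  rw [mem_pvGridList]; simpa [inGb] using h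

theorem length_of_mem (L : List (Int × Int)) (hL : L.Nodup) (p : Int × Int → Bool)
    (hmem : ∀ q, q ∈ L ↔ p q = true) (himp : ∀ q, p q = true → q ∈ pvGridList) :
    L.length = (pvGridList.filter p).length := by
  apply List.Perm.length_eq
  rw [List.perm_ext_iff_of_nodup hL (nodup_pvGridList.filter _)]
  intro a
  rw [hmem, List.mem_filter]
  exact ⟨fun h => ⟨himp _ h, h⟩, fun h => h.2⟩

theorem counts_ne : ∀ k : Nat, k < 7 → countTF k + countTS k ≠ 225 := by decide
theorem counts_mid_ne : ∀ k : Nat, k < 7 → countTF k + countTS (k + 1) ≠ 225 := by decide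

theorem loop_succ (fuel : Nat) (F S : PySem.Set (Int × Int)) (t : Nat) :
    pvLoopA (fuel + 1) F S t =
      if PySem.Set.len F + PySem.Set.len S ≠ 225 then
        if t % 2 = 0 then pvLoopA fuel F (pvEvenPass F S) (t + 1)
        else pvLoopA fuel (pvOddPass F S) S (t + 1)
      else F := rfl

theorem loop_run : ∀ d : Nat, ∀ k : Nat, k + d = 7 → ∀ fuel : Nat, 2 * d + 1 ≤ fuel →
    ∀ F S : PySem.Set (Int × Int), F.Nodup → S.Nodup →
    (∀ q, q ∈ F ↔ specF0 k q = true) → (∀ q, q ∈ S ↔ specS0 k q = true) →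
    ∀ q, q ∈ pvLoopA fuel F S (2 * k) ↔ specF0 7 q = true := by
  intro d
  induction d with
  | zero =>
    intro k hk fuel hfuel F S hFn hSn hF hS q
    obtain rfl : k = 7 := by omega
    obtain ⟨f, rfl⟩ : ∃ f, fuel = f + 1 := ⟨fuel - 1, by omega⟩
    rw [loop_succ]
    have hlF : F.length = 161 := by
      have := length_of_mem F hFn _ hF (fun q h => inGb_mem q (specF0_grid _ _ h))
      rw [this, (TC 7 (by omega)).1]
      decide

    have hlS : S.length = 64 := by
      have := length_of_mem S hSn _ hS (fun q h => inGb_mem q (specS0_grid _ _ h))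
      rw [this, (TC 7 (by omega)).2]
      decide
    rw [if_neg (by simp [PySem.Set.len, hlF, hlS])]
    exact hF q
  | succ d ih =>
    intro k hk fuel hfuel F S hFn hSn hF hS q
    have hk7 : k < 7 := by omega
    obtain ⟨f, rfl⟩ : ∃ f, fuel = f + 1 := ⟨fuel - 1, by omega⟩
    obtain ⟨f2, rfl⟩ : ∃ f2, f = f2 + 1 := ⟨f - 1, by omega⟩
    have hlF : F.length = countTF k := by
      have := length_of_mem F hFn _ hF (fun q h => inGb_mem q (specF0_grid _ _ h))
      rw [this, (TC k (by omega)).1]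
    have hlS : S.length = countTS k := by
      have := length_of_mem S hSn _ hS (fun q h => inGb_mem q (specS0_grid _ _ h))
      rw [this, (TC k (by omega)).2]
    rw [loop_succ, if_pos (by simp [PySem.Set.len, hlF, hlS]; exact_mod_cast counts_ne k hk7),
      if_pos (by omega)]
    -- even pass
    set S2 := pvEvenPass F S with hS2def
    have hS2 : ∀ q, q ∈ S2 ↔ specS0 (k + 1) q = true := by
      intro r
      rw [hS2def, mem_evenPass]
      by_cases hr : r ∈ pvGridList
      · rw [← TE k hk7 r hr]
        simp only [hS, mem_pvGridA, hF]
      · constructor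
        · rintro (h | ⟨h1, _⟩)
          · exact absurd (inGb_mem r (specS0_grid _ _ ((hS r).mp h))) hr
          · exact absurd (inGb_mem r ((mem_pvGridA r).mp h1)) hr
        · intro h
          exact absurd (inGb_mem r (specS0_grid _ _ h)) hr
    have hS2n : S2.Nodup := nodup_evenPass F S hSn
    have hlS2 : S2.length = countTS (k + 1) := by
      have := length_of_mem S2 hS2n _ hS2 (fun q h => inGb_mem q (specS0_grid _ _ h))
      rw [this, (TC (k+1) (by omega)).2]
    -- odd pass
    rw [loop_succ, if_pos (by simp [PySem.Set.len, hlF, hlS2]; exact_mod_cast counts_mid_ne k hk7),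
      if_neg (by omega)]
    set F2 := pvOddPass F S2 with hF2def
    have hF2 : ∀ q, q ∈ F2 ↔ specF0 (k + 1) q = true := by
      intro r
      rw [hF2def, mem_oddPass]
      by_cases hr : r ∈ pvGridList
      · rw [← TO k hk7 r hr]
        simp only [hF, mem_pvGridA, hS2]
      · constructor
        · rintro (h | ⟨h1, _⟩)
          · exact absurd (inGb_mem r (specF0_grid _ _ ((hF r).mp h))) hr
          · exact absurd (inGb_mem r ((mem_pvGridA r).mp h1)) hr
        · intro h
          exact absurd (inGb_mem r (specF0_grid _ _ h)) hr
    have hF2n : F2.Nodup := nodup_oddPass F S2 hFn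
    have : 2 * k + 1 + 1 = 2 * (k + 1) := by ring
    rw [this]
    exact ih (k + 1) (by omega) f2 (by omega) F2 S2 hF2n hS2n hF2 hS2 q

theorem mem_pvFirstA (q : Int × Int) : q ∈ pvFirstA ↔ specF0 7 q = true := by
  have h := loop_run 7 0 rfl 64 (by omega) PySem.Set.empty PySem.Set.empty
    (by simp [PySem.Set.empty]) (by simp [PySem.Set.empty])
    (by intro q; simp [PySem.Set.empty, specF0])
    (by intro q; simp [PySem.Set.empty, specS0]) q
  simpa [pvFirstA] using h

theorem mod_four (x : Int) : PySem.Int.mod x 4 = x % 4 :=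
  PySem.Int.mod_eq_emod_of_pos (by norm_num)

theorem win_iff (x y : Int) : specF0 7 (x, y) = true ↔
    (1 ≤ x ∧ x ≤ 15 ∧ 1 ≤ y ∧ y ≤ 15 ∧
      ¬ ((x % 4 = 1 ∨ x % 4 = 2) ∧ (y % 4 = 1 ∨ y % 4 = 2))) := by
  by_cases hg : (x, y) ∈ pvGridList
  · have hw := TW (x, y) hg
    have hb := (mem_pvGridList (x, y)).mp hg
    simp only at hb
    rw [hw]
    simp only [loseb, decide_eq_false_iff_not]
    constructor
    · intro h
      exact ⟨hb.1, hb.2.1, hb.2.2.1, hb.2.2.2, h⟩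
    · intro h
      exact h.2.2.2.2
  · constructor
    · intro h
      exact absurd (inGb_mem _ (specF0_grid _ _ h)) hg
    · intro h
      exact absurd ((mem_pvGridList (x, y)).mpr ⟨h.1, h.2.1, h.2.2.1, h.2.2.2.1⟩) hg

-- ===== VERDICT (by name: the statement is the Claim_ definition above) =====
theorem chessboard_game_spec : Claim_equal_chessboard_game := by
  intro x y _
  show chessboard_game x y = chessboard_game_alt x y
  unfold chessboard_game chessboard_game_alt
  have hb : ((x, y) ∈ pvFirstA) ↔ (1 ≤ x ∧ x ≤ 15 ∧ 1 ≤ y ∧ y ≤ 15 ∧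
      ¬ ((x % 4 = 1 ∨ x % 4 = 2) ∧ (y % 4 = 1 ∨ y % 4 = 2))) :=
    (mem_pvFirstA _).trans (win_iff x y)
  rw [mod_four, mod_four]
  split_ifs with h1 h2 h2
  · rfl
  · exact absurd (hb.mp h1) h2
  · exact absurd (hb.mpr h2) h1
  · rfl
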